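-- pv_equiv track=rewrite | github.com/lolothefuzzy-ai/polylog | Legacy/stable_library.py | _signature_from_polyforms
-- ===== SOURCE A (Python) =====
-- from typing import Any, Dict, List, Optional
--
-- def _signature_from_polyforms(polys: List[Dict[str, Any]]) -> str:
--     # Build S_id = S:axc_...
--     counts: Dict[int, int] = {}
--     for p in polys:
--         s = int(p.get('sides', 0))
--         if s >= 3:
--             counts[s] = counts.get(s, 0) + 1
--     parts = [f"{a}x{c}" for a, c in sorted(counts.items())]
--     return "S:" + "_".join(parts)
-- ===== SOURCE B (Python) =====
-- def _runs(sides):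
--     # run-length encode a sorted list into "valuexcount" parts, recursively.
--     if not sides:
--         return []
--     v = sides[0]
--     k = 1
--     while k < len(sides) and sides[k] == v:
--         k += 1
--     return [f"{v}x{k}"] + _runs(sides[k:])
--
-- def _signature_from_polyforms(polys):
--     # sort the filtered side counts, then one grouped linear pass (no dict aggregation)
--     sides = sorted(s for s in (int(p.get('sides', 0)) for p in polys) if s >= 3)
--     return "S:" + "_".join(_runs(sides))
-- ===== Notes on version B (the rewrite author's own statement) =====
-- stated objective: alternative
-- what changed: Replaces dict aggregation + sorted(items) by sort-then-run-length-encode: the filtered side counts are sorted first and a recursive grouped pass emits one 'vxc' part per maximal run of equal values.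
import Mathlib
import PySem

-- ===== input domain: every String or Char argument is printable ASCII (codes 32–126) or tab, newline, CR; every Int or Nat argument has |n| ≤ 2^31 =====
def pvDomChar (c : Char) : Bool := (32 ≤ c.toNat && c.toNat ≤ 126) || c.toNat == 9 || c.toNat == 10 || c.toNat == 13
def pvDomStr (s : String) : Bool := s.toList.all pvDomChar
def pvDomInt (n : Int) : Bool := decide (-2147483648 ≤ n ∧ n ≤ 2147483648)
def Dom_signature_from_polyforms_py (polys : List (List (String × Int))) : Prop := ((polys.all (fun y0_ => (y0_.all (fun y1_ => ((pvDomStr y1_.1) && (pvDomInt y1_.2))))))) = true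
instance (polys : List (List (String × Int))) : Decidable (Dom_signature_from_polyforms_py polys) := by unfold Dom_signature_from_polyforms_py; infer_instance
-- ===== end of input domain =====

-- B replaces A's dict aggregation + sorted(items) by sort-then-run-length-encode (one grouped
-- recursive pass over the sorted filtered side counts); alternative decomposition, equal output.

-- ===== PORT A =====
-- int(p.get('sides', 0)): on this Int-valued domain int() is the identity.
def signature_from_polyforms_py (polys : List (List (String × Int))) : String :=
  let counts : PySem.Dict Int Int :=
    polys.foldl (fun d p =>
      let s := (PySem.Dict.mk p).getD "sides" 0
      if 3 ≤ s then d.insert s (d.getD s 0 + 1) else d) PySem.Dict.empty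
  -- sorted(counts.items()): Python sorts the (key, value) tuples lexicographically
  let parts := (PySem.List.sorted2 counts.items (fun q => q.1) (fun q => q.2)).map
      (fun q => PySem.Int.toStr q.1 ++ "x" ++ PySem.Int.toStr q.2)
  "S:" ++ PySem.Str.join "_" parts

-- ===== PORT B =====
-- _runs: the inner while scans the maximal run of the head value (takeWhile on the tail),
-- emits "vxk", and recurses on sides[k:] (dropWhile on the tail).
def pvRuns : List Int → List String
  | [] => []
  | v :: rest =>
    (PySem.Int.toStr v ++ "x" ++ PySem.Int.toStr (((rest.takeWhile (fun y => y == v)).length + 1 : Nat) : Int)) ::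
      pvRuns (rest.dropWhile (fun y => y == v))
termination_by l => l.length
decreasing_by exact Nat.lt_succ_of_le (List.length_dropWhile_le ..)

def signature_from_polyforms_py_alt (polys : List (List (String × Int))) : String :=
  let sides := PySem.List.sorted
      ((polys.map (fun p => (PySem.Dict.mk p).getD "sides" 0)).filter (fun s => decide (3 ≤ s)))
      (fun v => v)
  "S:" ++ PySem.Str.join "_" (pvRuns sides)

-- ===== PRECONDITION & SPEC =====
def Spec_signature_from_polyforms_py (polys : List (List (String × Int))) (out : String) : Prop := out = signature_from_polyforms_py_alt polys
instance (polys : List (List (String × Int))) (out : String) : Decidable (Spec_signature_from_polyforms_py polys out) := by unfold Spec_signature_from_polyforms_py; infer_instance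

-- ===== CLAIM (what is proved, stated in full; the proofs are below) =====
def Claim_equal_signature_from_polyforms_py : Prop := ∀ (polys : List (List (String × Int))), Dom_signature_from_polyforms_py polys → Spec_signature_from_polyforms_py polys (signature_from_polyforms_py polys)

-- ===== LEMMAS AND PROOFS =====

-- proof-only helper: the distinct values of a sorted list, in order
def pvDistinct : List Int → List Int
  | [] => []
  | v :: rest => v :: pvDistinct (rest.dropWhile (fun y => y == v))
termination_by l => l.length
decreasing_by exact Nat.lt_succ_of_le (List.length_dropWhile_le ..)

theorem pv_mem_distinct (ys : List Int) (k : Int) : k ∈ pvDistinct ys ↔ k ∈ ys := by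
  induction ys using pvDistinct.induct with
  | case1 => simp [pvDistinct]
  | case2 v rest ih =>
    rw [pvDistinct]
    simp only [List.mem_cons, ih]
    constructor
    · rintro (rfl | h)
      · exact Or.inl rfl
      · exact Or.inr ((List.dropWhile_sublist ..).mem h)
    · rintro (rfl | h)
      · exact Or.inl rfl
      · rw [← List.takeWhile_append_dropWhile (p := fun y => y == v) (l := rest)] at h
        rcases List.mem_append.1 h with h | h
        · left; have := List.mem_takeWhile_imp h; simpa using this
        · exact Or.inr h

-- in a sorted list, everything after the head's run is strictly greater than the head
theorem pv_gt_of_mem_dropWhile (v : Int) (rest : List Int)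
    (hp : (v :: rest).Pairwise (· ≤ ·)) :
    ∀ k ∈ rest.dropWhile (fun y => y == v), v < k := by
  intro k hk
  cases hd : rest.dropWhile (fun y => y == v) with
  | nil => simp [hd] at hk
  | cons h t =>
    have hne : (h == v) = false := by
      have := List.head_dropWhile_not (fun y => y == v) (l := rest) (by simp [hd])
      simpa [hd] using this
    have hsub : (h :: t).Sublist rest := hd ▸ List.dropWhile_sublist ..
    have hvh : v ≤ h := (List.pairwise_cons.1 hp).1 h (hsub.mem List.mem_cons_self)
    have hvh' : v < h := lt_of_le_of_ne hvh (fun e => by simp [e.symm] at hne)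
    rw [hd] at hk
    rcases List.mem_cons.1 hk with rfl | hk
    · exact hvh'
    · have hpr : (h :: t).Pairwise (· ≤ ·) :=
        ((List.pairwise_cons.1 hp).2).sublist hsub
      exact lt_of_lt_of_le hvh' ((List.pairwise_cons.1 hpr).1 k hk)

theorem pv_distinct_pairwise_lt (ys : List Int) (hp : ys.Pairwise (· ≤ ·)) :
    (pvDistinct ys).Pairwise (· < ·) := by
  induction ys using pvDistinct.induct with
  | case1 => simp [pvDistinct]
  | case2 v rest ih =>
    rw [pvDistinct, List.pairwise_cons]
    refine ⟨fun k hk => ?_, ih (((List.pairwise_cons.1 hp).2).sublist (List.dropWhile_sublist ..))⟩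
    exact pv_gt_of_mem_dropWhile v rest hp k ((pv_mem_distinct _ k).1 hk)

-- run-length encoding of a sorted list = one part per distinct value with its count
theorem pv_runs_eq_map_distinct (ys : List Int) (hp : ys.Pairwise (· ≤ ·)) :
    pvRuns ys = (pvDistinct ys).map
      (fun k => PySem.Int.toStr k ++ "x" ++ PySem.Int.toStr ((ys.count k : Nat) : Int)) := by
  induction ys using pvRuns.induct with
  | case1 => simp [pvRuns, pvDistinct]
  | case2 v rest ih =>
    have hrest : rest.Pairwise (· ≤ ·) := (List.pairwise_cons.1 hp).2
    have hrest' : (rest.dropWhile (fun y => y == v)).Pairwise (· ≤ ·) :=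
      hrest.sublist (List.dropWhile_sublist ..)
    have hsplit : rest.takeWhile (fun y => y == v) ++ rest.dropWhile (fun y => y == v) = rest :=
      List.takeWhile_append_dropWhile
    rw [pvRuns, pvDistinct, List.map_cons, ih hrest']
    congr 1
    · -- the head part: the run length is the count of v
      have h1 : (rest.takeWhile (fun y => y == v)).count v = (rest.takeWhile (fun y => y == v)).length :=
        List.count_eq_length.2 (fun b hb => by
          have := List.mem_takeWhile_imp hb; simp at this ⊢; omega)
      have h2 : (rest.dropWhile (fun y => y == v)).count v = 0 :=
        List.count_eq_zero.2 (fun hv => lt_irrefl v (pv_gt_of_mem_dropWhile v rest hp v hv))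
      have hc : (v :: rest).count v = (rest.takeWhile (fun y => y == v)).length + 1 := by
        rw [List.count_cons, if_pos (by simp)]
        conv_lhs => rw [← hsplit]
        rw [List.count_append, h1, h2]
      rw [hc]
    · -- the tail parts: counts of the later distinct values are unchanged
      apply List.map_congr_left
      intro k hk
      have hkmem : k ∈ rest.dropWhile (fun y => y == v) := (pv_mem_distinct _ k).1 hk
      have hvk : v < k := pv_gt_of_mem_dropWhile v rest hp k hkmem
      have ht0 : (rest.takeWhile (fun y => y == v)).count k = 0 :=
        List.count_eq_zero.2 (fun hkt => by
          have := List.mem_takeWhile_imp hkt; simp at this; omega)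
      have hc : (v :: rest).count k = (rest.dropWhile (fun y => y == v)).count k := by
        rw [List.count_cons, if_neg (by simp; omega)]
        conv_lhs => rw [← hsplit]
        rw [List.count_append, ht0]
        omega
      rw [hc]

-- the ascending distinct values of sorted(xs) are sorted(set(xs))
theorem pv_sorted_set_eq_distinct (xs : List Int) :
    PySem.List.sorted (PySem.Set.ofList xs) (fun v => v)
      = pvDistinct (PySem.List.sorted xs (fun v => v)) := by
  apply PySem.List.sorted_eq_of_perm_of_pairwise_lt
  · apply (List.perm_ext_iff_of_nodup ?_ ?_).2
    · intro a
      rw [pv_mem_distinct, PySem.List.mem_sorted, PySem.Set.mem_ofList]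
    · exact (pv_distinct_pairwise_lt _ (PySem.List.sorted_pairwise ..)).nodup
    · exact PySem.Set.nodup_ofList xs
  · exact pv_distinct_pairwise_lt _ (PySem.List.sorted_pairwise ..)

-- ===== A-side lemmas (dict aggregation = counter of the filtered list; tuple sort = key sort) =====
theorem pv_insertBy_congr {α : Type} (f g : α → α → Bool) (x : α) (ys : List α)
    (h : ∀ y ∈ ys, f x y = g x y) :
    PySem.List.insertBy f x ys = PySem.List.insertBy g x ys := by
  induction ys with
  | nil => rfl
  | cons y ys ih =>
    have hf : PySem.List.insertBy f x (y :: ys) =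
        if f x y = true then x :: y :: ys else y :: PySem.List.insertBy f x ys := rfl
    have hg : PySem.List.insertBy g x (y :: ys) =
        if g x y = true then x :: y :: ys else y :: PySem.List.insertBy g x ys := rfl
    rw [hf, hg, h y (List.mem_cons_self), ih (fun z hz => h z (List.mem_cons_of_mem _ hz))]

theorem pv_foldl_insertBy_congr {α : Type} (f g : α → α → Bool) :
    ∀ (zs acc : List α),
      (∀ a ∈ zs, ∀ b ∈ acc, f a b = g a b) →
      (∀ a ∈ zs, ∀ b ∈ zs, a ≠ b → f a b = g a b) →
      zs.Nodup → (∀ a ∈ zs, a ∉ acc) →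
      zs.foldl (fun acc x => PySem.List.insertBy f x acc) acc =
        zs.foldl (fun acc x => PySem.List.insertBy g x acc) acc := by
  intro zs
  induction zs with
  | nil => intro acc _ _ _ _; rfl
  | cons x rest ih =>
    intro acc h1 h2 hnd hdisj
    have hx : PySem.List.insertBy f x acc = PySem.List.insertBy g x acc :=
      pv_insertBy_congr f g x acc (fun b hb => h1 x List.mem_cons_self b hb)
    simp only [List.foldl_cons, hx]
    apply ih (PySem.List.insertBy g x acc)
    · intro a ha b hb
      rcases (PySem.List.mem_insertBy g x b acc).1 hb with hb | hb
      · have hax : a ≠ b := by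
          intro hax; rw [hax, hb] at ha; exact (List.nodup_cons.1 hnd).1 ha
        rw [hb]
        exact h2 a (List.mem_cons_of_mem _ ha) x List.mem_cons_self (hb ▸ hax)
      · exact h1 a (List.mem_cons_of_mem _ ha) b hb
    · intro a ha b hb hab
      exact h2 a (List.mem_cons_of_mem _ ha) b (List.mem_cons_of_mem _ hb) hab
    · exact (List.nodup_cons.1 hnd).2
    · intro a ha hmem
      rcases (PySem.List.mem_insertBy g x a acc).1 hmem with h | h
      · exact (List.nodup_cons.1 hnd).1 (h ▸ ha)
      · exact hdisj a (List.mem_cons_of_mem _ ha) h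

theorem pv_sorted2_eq_sorted_fst (zs : List (Int × Int)) (hnd : (zs.map Prod.fst).Nodup) :
    PySem.List.sorted2 zs (fun q => q.1) (fun q => q.2) = PySem.List.sorted zs (fun q => q.1) := by
  have hzs : zs.Nodup := hnd.of_map
  show zs.foldl (fun acc x => PySem.List.insertBy _ x acc) [] =
       zs.foldl (fun acc x => PySem.List.insertBy _ x acc) []
  apply pv_foldl_insertBy_congr
  · intro a _ b hb; cases hb
  · intro a ha b hb hab
    have hfst : a.1 ≠ b.1 := by
      intro h
      exact hab (List.inj_on_of_nodup_map hnd ha hb h)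
    rcases lt_trichotomy a.1 b.1 with h | h | h
    · simp [h]
    · exact absurd h hfst
    · simp [h, not_lt_of_gt h]
  · exact hzs
  · intro a _ h; cases h

theorem pv_counts_eq_counter (polys : List (List (String × Int))) :
    polys.foldl (fun d p =>
        let s := (PySem.Dict.mk p).getD "sides" 0
        if 3 ≤ s then d.insert s (d.getD s 0 + 1) else d) PySem.Dict.empty =
      PySem.Dict.counter
        ((polys.map (fun p => (PySem.Dict.mk p).getD "sides" 0)).filter (fun s => decide (3 ≤ s))) := by
  rw [← PySem.Dict.foldl_insert_getD_add_one_eq_counter, List.foldl_filter, List.foldl_map]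
  simp only [decide_eq_true_eq]

-- ===== VERDICT (by name: the statement is the Claim_ definition above) =====
theorem signature_from_polyforms_py_spec : Claim_equal_signature_from_polyforms_py := by
  intro polys _
  unfold Spec_signature_from_polyforms_py signature_from_polyforms_py signature_from_polyforms_py_alt
  simp only [pv_counts_eq_counter]
  set xs := (polys.map (fun p => (PySem.Dict.mk p).getD "sides" 0)).filter (fun s => decide (3 ≤ s)) with hxs
  have hitems : (PySem.Dict.counter xs).items
      = (PySem.Set.ofList xs).map (fun k => (k, (xs.count k : Int))) :=
    PySem.Dict.items_counter xs
  have hndfst : (((PySem.Set.ofList xs).map (fun k => (k, (xs.count k : Int)))).map Prod.fst).Nodup := by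
    simp only [List.map_map]
    have hcomp : (Prod.fst ∘ fun k : Int => (k, (xs.count k : Int))) = fun k => k := rfl
    rw [hcomp]
    simp [PySem.Set.nodup_ofList xs]
  have hsort : PySem.List.sorted2 ((PySem.Set.ofList xs).map (fun k => (k, (xs.count k : Int))))
        (fun q => q.1) (fun q => q.2)
      = (PySem.List.sorted (PySem.Set.ofList xs) (fun v => v)).map (fun k => (k, (xs.count k : Int))) := by
    rw [pv_sorted2_eq_sorted_fst _ hndfst]
    apply PySem.List.sorted_eq_of_perm_of_pairwise_lt
    · exact (PySem.List.sorted_perm _ _ _).map _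
    · exact List.Pairwise.map _ (fun a b h => h) (PySem.List.sorted_ofList_pairwise_lt xs)
  rw [hitems, hsort, List.map_map]
  -- B side: run-length encoding of the sorted list
  rw [pv_runs_eq_map_distinct _ (PySem.List.sorted_pairwise ..), ← pv_sorted_set_eq_distinct]
  congr 2
  apply List.map_congr_left
  intro k _
  rw [(PySem.List.sorted_perm xs (fun v => v) false).count_eq k]
  rfl
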